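-- pv_equiv track=rewrite | github.com/aanhtran01/SpectrumAssembler | euleriangenomeassembly.py | class_character_arrangement
-- ===== SOURCE A (Python) =====
-- def class_character_arrangement(S, arrangement):
--     # Method that computes the character classes for each position in the suffix array
--     l = len(S)
--     class_characters = [0] * l
--     class_characters[arrangement[0]] = 0
--
--     # Assign the class to each suffix based on whether the starting character is the same as the previous suffix
--     for i in range(1, l):
--         if S[arrangement[i]] != S[arrangement[i-1]]:
--             class_characters[arrangement[i]] = class_characters[arrangement[i-1]] + 1
--         else:
--             class_characters[arrangement[i]] = class_characters[arrangement[i-1]]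
--
--     return class_characters
-- ===== SOURCE B (Python) =====
-- def class_character_arrangement(S, arrangement):
--     # Boundary list + binary search: collect the ranks where the leading character
--     # changes, then the class of rank i is the number of boundaries at or before i,
--     # found independently per rank by bisection instead of a running counter.
--     l = len(S)
--     boundaries = [i for i in range(1, l) if S[arrangement[i]] != S[arrangement[i - 1]]]
--     class_characters = [0] * l
--     for i in range(1, l):
--         lo, hi = 0, len(boundaries)
--         while lo < hi:
--             mid = (lo + hi) // 2
--             if boundaries[mid] <= i:
--                 lo = mid + 1
--             else:
--                 hi = mid
--         class_characters[arrangement[i]] = lo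
--     return class_characters
-- ===== Notes on version B (the rewrite author's own statement) =====
-- stated objective: alternative
-- what changed: Replaces A's single incremental loop with a running class counter by a boundary-list + binary-search algorithm: first collect the ranks where the leading character changes, then compute each rank's class independently as the number of boundaries at or before it via a hand-written bisection.
import Mathlib
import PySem

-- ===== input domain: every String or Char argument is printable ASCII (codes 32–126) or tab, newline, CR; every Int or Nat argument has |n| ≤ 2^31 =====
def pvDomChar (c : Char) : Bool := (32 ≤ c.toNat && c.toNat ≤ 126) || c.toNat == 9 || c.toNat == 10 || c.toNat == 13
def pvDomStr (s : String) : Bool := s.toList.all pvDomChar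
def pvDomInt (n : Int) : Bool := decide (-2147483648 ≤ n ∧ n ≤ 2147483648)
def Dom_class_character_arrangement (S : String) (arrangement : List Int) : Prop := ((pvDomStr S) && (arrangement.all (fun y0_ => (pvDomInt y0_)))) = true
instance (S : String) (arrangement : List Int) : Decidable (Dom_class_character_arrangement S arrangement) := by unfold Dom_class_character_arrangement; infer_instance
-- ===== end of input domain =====

-- B replaces A's incremental running-counter loop by a different algorithm: it collects the
-- ranks where the leading character changes into a boundary list and computes each rank's
-- class independently as the number of boundaries at or before it, by binary search.

-- ===== PORT A =====
def class_character_arrangement (S : String) (arrangement : List Int) : List Int :=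
  let l := S.toList.length
  let cc0 := PySem.List.pySetD (List.replicate l (0 : Int)) (PySem.List.pyGetD arrangement 0 0) 0
  (PySem.List.pyRange 1 (l : Int) 1).foldl
    (fun cc i =>
      if PySem.List.pyGetD S.toList (PySem.List.pyGetD arrangement i 0) ' '
          ≠ PySem.List.pyGetD S.toList (PySem.List.pyGetD arrangement (i - 1) 0) ' ' then
        PySem.List.pySetD cc (PySem.List.pyGetD arrangement i 0)
          (PySem.List.pyGetD cc (PySem.List.pyGetD arrangement (i - 1) 0) 0 + 1)
      else
        PySem.List.pySetD cc (PySem.List.pyGetD arrangement i 0)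
          (PySem.List.pyGetD cc (PySem.List.pyGetD arrangement (i - 1) 0) 0))
    cc0

-- ===== PORT B =====
-- B's while-loop over (lo, hi): both stay natural numbers in Python (0 ≤ lo ≤ hi ≤ len),
-- so Nat with Nat division matches Python's `(lo + hi) // 2` exactly.
def pvBisectLoop (bs : List Int) (i : Int) (lo hi : Nat) : Nat :=
  if lo < hi then
    if PySem.List.pyGetD bs (((lo + hi) / 2 : Nat) : Int) 0 ≤ i then
      pvBisectLoop bs i ((lo + hi) / 2 + 1) hi
    else
      pvBisectLoop bs i lo ((lo + hi) / 2)
  else lo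
termination_by hi - lo
decreasing_by all_goals omega

def class_character_arrangement_alt (S : String) (arrangement : List Int) : List Int :=
  let l := S.toList.length
  let boundaries := (PySem.List.pyRange 1 (l : Int) 1).filter
    (fun i => PySem.List.pyGetD S.toList (PySem.List.pyGetD arrangement i 0) ' '
              != PySem.List.pyGetD S.toList (PySem.List.pyGetD arrangement (i - 1) 0) ' ')
  (PySem.List.pyRange 1 (l : Int) 1).foldl
    (fun res i => PySem.List.pySetD res (PySem.List.pyGetD arrangement i 0)
      ((pvBisectLoop boundaries i 0 boundaries.length : Nat) : Int))
    (List.replicate l (0 : Int))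

-- ===== PRECONDITION & SPEC =====
-- Pre_ excludes exactly the inputs where A raises IndexError: empty S, an arrangement shorter
-- than S, or an entry among the first len(S) ones that is out of range as an index into S.
def Pre_class_character_arrangement (S : String) (arrangement : List Int) : Prop :=
  1 ≤ S.toList.length ∧ S.toList.length ≤ arrangement.length ∧
  ∀ a ∈ arrangement.take S.toList.length,
    -(S.toList.length : Int) ≤ a ∧ a < (S.toList.length : Int)
instance (S : String) (arrangement : List Int) : Decidable (Pre_class_character_arrangement S arrangement) := by
  unfold Pre_class_character_arrangement; infer_instance
def pvWitness_class_character_arrangement : String × List Int := ("aba", [2, 0, 1])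

def Spec_class_character_arrangement (S : String) (arrangement : List Int) (out : List Int) : Prop := out = class_character_arrangement_alt S arrangement
instance (S : String) (arrangement : List Int) (out : List Int) : Decidable (Spec_class_character_arrangement S arrangement out) := by unfold Spec_class_character_arrangement; infer_instance

-- ===== CLAIM (what is proved, stated in full; the proofs are below) =====
def Claim_equal_class_character_arrangement : Prop := ∀ (S : String) (arrangement : List Int), Dom_class_character_arrangement S arrangement → Pre_class_character_arrangement S arrangement → Spec_class_character_arrangement S arrangement (class_character_arrangement S arrangement)

-- ===== LEMMAS AND PROOFS =====

-- Python's normalisation of an in-range (possibly negative) index into a list of length n.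
def pvIdx (n : Nat) (i : Int) : Nat := if 0 ≤ i then i.toNat else n - (-i).toNat

lemma pvIdx_lt (n : Nat) (i : Int) (h1 : -(n : Int) ≤ i) (h2 : i < (n : Int)) : pvIdx n i < n := by
  unfold pvIdx; split_ifs with h <;> omega

lemma pyIdx?_inrange (n : Nat) (i : Int) (h1 : -(n : Int) ≤ i) (h2 : i < (n : Int)) :
    PySem.List.pyIdx? n i = some (pvIdx n i) := by
  simp only [PySem.List.pyIdx?, pvIdx]
  split_ifs with h1' <;> rfl

lemma pyGetD_inrange {α : Type} (xs : List α) (i : Int) (d : α)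
    (h1 : -(xs.length : Int) ≤ i) (h2 : i < (xs.length : Int)) :
    PySem.List.pyGetD xs i d = xs.getD (pvIdx xs.length i) d := by
  simp only [PySem.List.pyGetD, PySem.List.pyGet?, pyIdx?_inrange xs.length i h1 h2,
    Option.bind_some, List.getD_eq_getElem?_getD]

lemma pySetD_inrange {α : Type} (xs : List α) (i : Int) (v : α)
    (h1 : -(xs.length : Int) ≤ i) (h2 : i < (xs.length : Int)) :
    PySem.List.pySetD xs i v = xs.set (pvIdx xs.length i) v := by
  simp only [PySem.List.pySetD, PySem.List.pySet?, pyIdx?_inrange xs.length i h1 h2,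
    Option.map_some, Option.getD_some]

-- the character class key at rank j, the class counter, and the scattered result after m writes
def pvKey (S : List Char) (arr : List Int) (j : Nat) : Char :=
  S.getD (pvIdx S.length (arr.getD j 0)) ' '

def pvC (S : List Char) (arr : List Int) : Nat → Int
  | 0 => 0
  | j + 1 => pvC S arr j + (if pvKey S arr (j + 1) ≠ pvKey S arr j then 1 else 0)

def pvW (S : List Char) (arr : List Int) (m : Nat) : List Int :=
  (List.range m).foldl
    (fun res j => res.set (pvIdx S.length (arr.getD j 0)) (pvC S arr j))
    (List.replicate S.length 0)

lemma pvW_succ (S : List Char) (arr : List Int) (m : Nat) :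
    pvW S arr (m + 1) = (pvW S arr m).set (pvIdx S.length (arr.getD m 0)) (pvC S arr m) := by
  simp [pvW, List.range_succ]

lemma pvW_length (S : List Char) (arr : List Int) (m : Nat) :
    (pvW S arr m).length = S.length := by
  induction m with
  | zero => simp [pvW]
  | succ m ih => rw [pvW_succ]; simpa using ih

lemma pvW_getD_last (S : List Char) (arr : List Int) (m : Nat)
    (h : pvIdx S.length (arr.getD m 0) < S.length) :
    (pvW S arr (m + 1)).getD (pvIdx S.length (arr.getD m 0)) 0 = pvC S arr m := by
  rw [pvW_succ]
  rw [List.getD_eq_getElem?_getD, List.getElem?_set_self (by rw [pvW_length]; exact h)]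
  rfl

-- the key character at rank j as Python reads it
lemma pvKey_eq (Sl : List Char) (arr : List Int) (j : Nat)
    (h1 : -(Sl.length : Int) ≤ arr.getD j 0) (h2 : arr.getD j 0 < (Sl.length : Int)) :
    PySem.List.pyGetD Sl (arr.getD j 0) ' ' = pvKey Sl arr j := by
  rw [pyGetD_inrange Sl _ _ h1 h2]; rfl

-- A's loop, processed up to rank t (inclusive), equals the first t+1 scatter writes.
lemma pvALoop (Sl : List Char) (arr : List Int)
    (hb : ∀ j, j < Sl.length → -(Sl.length : Int) ≤ arr.getD j 0 ∧ arr.getD j 0 < (Sl.length : Int)) :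
    ∀ t : Nat, t < Sl.length →
      (PySem.List.pyRange 1 ((t + 1 : Nat) : Int) 1).foldl
        (fun cc i =>
          if PySem.List.pyGetD Sl (PySem.List.pyGetD arr i 0) ' '
              ≠ PySem.List.pyGetD Sl (PySem.List.pyGetD arr (i - 1) 0) ' ' then
            PySem.List.pySetD cc (PySem.List.pyGetD arr i 0)
              (PySem.List.pyGetD cc (PySem.List.pyGetD arr (i - 1) 0) 0 + 1)
          else
            PySem.List.pySetD cc (PySem.List.pyGetD arr i 0)
              (PySem.List.pyGetD cc (PySem.List.pyGetD arr (i - 1) 0) 0))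
        (pvW Sl arr 1) = pvW Sl arr (t + 1) := by
  intro t
  induction t with
  | zero =>
    intro _
    rw [PySem.List.pyRange_one_eq_nil (by norm_num)]
    rfl
  | succ t ih =>
    intro ht
    have ht' : t < Sl.length := by omega
    have hbt := hb t ht'
    have hbt1 := hb (t + 1) ht
    rw [show ((t + 1 + 1 : Nat) : Int) = ((t + 1 : Nat) : Int) + 1 by push_cast; ring,
      PySem.List.pyRange_one_succ_right (by omega), List.foldl_append, ih ht']
    have e2 : (((t + 1 : Nat) : Int)) - 1 = ((t : Nat) : Int) := by push_cast; ring
    simp only [List.foldl_cons, List.foldl_nil, e2, PySem.List.pyGetD_natCast]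
    have hlen : (pvW Sl arr (t + 1)).length = Sl.length := pvW_length Sl arr (t + 1)
    rw [pvKey_eq Sl arr (t + 1) hbt1.1 hbt1.2, pvKey_eq Sl arr t hbt.1 hbt.2,
      pyGetD_inrange (pvW Sl arr (t + 1)) _ _ (by rw [hlen]; exact hbt.1) (by rw [hlen]; exact hbt.2),
      pySetD_inrange (pvW Sl arr (t + 1)) _ _ (by rw [hlen]; exact hbt1.1) (by rw [hlen]; exact hbt1.2),
      pySetD_inrange (pvW Sl arr (t + 1)) _ _ (by rw [hlen]; exact hbt1.1) (by rw [hlen]; exact hbt1.2),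
      hlen, pvW_getD_last Sl arr t (pvIdx_lt _ _ hbt.1 hbt.2),
      pvW_succ Sl arr (t + 1)]
    by_cases hk : pvKey Sl arr (t + 1) ≠ pvKey Sl arr t
    · rw [if_pos hk]; rw [show pvC Sl arr (t + 1) = pvC Sl arr t + 1 by simp [pvC, hk]]
    · rw [if_neg hk]; rw [show pvC Sl arr (t + 1) = pvC Sl arr t by simp [pvC]; simp at hk; simp [hk]]

-- B's binary search on a strictly sorted list returns the number of elements ≤ i,
-- given the invariant that everything below lo is ≤ i and everything from hi on is > i.
lemma pvBisectLoop_count (bs : List Int) (i : Int) (hs : bs.Pairwise (· < ·)) :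
    ∀ d lo hi, hi - lo = d → lo ≤ hi → hi ≤ bs.length →
      (∀ k, k < lo → bs.getD k 0 ≤ i) →
      (∀ k, hi ≤ k → k < bs.length → i < bs.getD k 0) →
      pvBisectLoop bs i lo hi = bs.countP (fun b => decide (b ≤ i)) := by
  intro d
  induction d using Nat.strong_induction_on with
  | _ d ih =>
    intro lo hi hd hlh hhl hlow hhigh
    rw [pvBisectLoop]
    by_cases hlt : lo < hi
    · rw [if_pos hlt]
      have hmid1 : lo ≤ (lo + hi) / 2 := by omega
      have hmid2 : (lo + hi) / 2 < hi := by omega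
      have hmlen : (lo + hi) / 2 < bs.length := by omega
      have hget : PySem.List.pyGetD bs (((lo + hi) / 2 : Nat) : Int) 0
          = bs.getD ((lo + hi) / 2) 0 := PySem.List.pyGetD_natCast bs _ 0
      have hsorted : ∀ a b, a < b → b < bs.length → bs.getD a 0 < bs.getD b 0 := by
        intro a b hab hbl
        have hal : a < bs.length := by omega
        rw [List.getD_eq_getElem?_getD, List.getD_eq_getElem?_getD,
          List.getElem?_eq_getElem hal, List.getElem?_eq_getElem hbl]
        exact List.pairwise_iff_getElem.mp hs a b hal hbl hab
      by_cases hle : bs.getD ((lo + hi) / 2) 0 ≤ i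
      · rw [hget, if_pos hle]
        refine ih (hi - ((lo + hi) / 2 + 1)) (by omega) _ _ rfl (by omega) hhl ?_ hhigh
        intro k hk
        rcases Nat.lt_or_ge k lo with h | h
        · exact hlow k h
        · rcases Nat.eq_or_lt_of_le (by omega : k ≤ (lo + hi) / 2) with h' | h'
          · rwa [h']
          · exact le_of_lt (lt_of_lt_of_le (hsorted k _ h' hmlen) hle)
      · rw [hget, if_neg hle]
        refine ih ((lo + hi) / 2 - lo) (by omega) _ _ rfl (by omega) (by omega) hlow ?_
        intro k hk hkl
        rcases Nat.eq_or_lt_of_le hk with h' | h'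
        · rw [← h']; omega
        · exact lt_trans (by omega) (hsorted _ k h' hkl)
    · rw [if_neg hlt]
      have heq : lo = hi := by omega
      subst heq
      -- count = lo: the first lo elements satisfy, the rest do not
      rw [← List.take_append_drop lo bs, List.countP_append]
      have h1 : (bs.take lo).countP (fun b => decide (b ≤ i)) = lo := by
        rw [List.countP_eq_length.mpr, List.length_take_of_le (by omega)]
        intro a ha
        obtain ⟨k, hk, rfl⟩ := List.getElem_of_mem ha
        have hk' : k < lo := by have := List.length_take_le lo bs; simp at hk; omega
        have := hlow k hk'
        rw [List.getElem_take]
        simp only [decide_eq_true_eq]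
        rw [List.getD_eq_getElem?_getD, List.getElem?_eq_getElem (by omega)] at this
        exact this
      have h2 : (bs.drop lo).countP (fun b => decide (b ≤ i)) = 0 := by
        rw [List.countP_eq_zero]
        intro a ha
        obtain ⟨k, hk, rfl⟩ := List.getElem_of_mem ha
        have hk'' : k < bs.length - lo := by simpa using hk
        have hk' : lo + k < bs.length := by omega
        have := hhigh (lo + k) (by omega) hk'
        rw [List.getElem_drop]
        simp only [decide_eq_true_eq, not_le]
        rw [List.getD_eq_getElem?_getD, List.getElem?_eq_getElem hk'] at this
        exact this
      rw [h1, h2, ← List.take_append_drop lo bs, List.countP_append] at *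
      omega


-- setting a 0 into an all-zero list changes nothing
lemma pvSetRep (n k : Nat) : (List.replicate n (0 : Int)).set k 0 = List.replicate n 0 := by
  apply List.ext_getElem (by simp)
  intro j h1 h2
  rw [List.getElem_set]
  split_ifs <;> simp

lemma pvW_one (Sl : List Char) (arr : List Int) :
    pvW Sl arr 1 = List.replicate Sl.length 0 := by
  simp only [pvW, List.range_succ, List.range_zero, List.nil_append, List.foldl_cons,
    List.foldl_nil]
  exact pvSetRep _ _

-- the boundary predicate of B's comprehension, at a natural-number rank
lemma pvChg_eq (Sl : List Char) (arr : List Int) (t : Nat)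
    (hb1 : -(Sl.length : Int) ≤ arr.getD (t + 1) 0 ∧ arr.getD (t + 1) 0 < (Sl.length : Int))
    (hb0 : -(Sl.length : Int) ≤ arr.getD t 0 ∧ arr.getD t 0 < (Sl.length : Int)) :
    (PySem.List.pyGetD Sl (PySem.List.pyGetD arr (((t + 1 : Nat) : Int)) 0) ' '
      != PySem.List.pyGetD Sl (PySem.List.pyGetD arr (((t + 1 : Nat) : Int) - 1) 0) ' ')
      = decide (pvKey Sl arr (t + 1) ≠ pvKey Sl arr t) := by
  have e2 : (((t + 1 : Nat) : Int)) - 1 = ((t : Nat) : Int) := by push_cast; ring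
  rw [e2, PySem.List.pyGetD_natCast, PySem.List.pyGetD_natCast,
    pvKey_eq Sl arr (t + 1) hb1.1 hb1.2, pvKey_eq Sl arr t hb0.1 hb0.2]
  rcases Decidable.eq_or_ne (pvKey Sl arr (t + 1)) (pvKey Sl arr t) with h | h <;> simp [h]

-- the number of change-ranks among 1..t is A's running class counter pvC t
lemma pvCntRange (Sl : List Char) (arr : List Int)
    (hb : ∀ j, j < Sl.length → -(Sl.length : Int) ≤ arr.getD j 0 ∧ arr.getD j 0 < (Sl.length : Int)) :
    ∀ t : Nat, t < Sl.length →
      (((PySem.List.pyRange 1 ((t + 1 : Nat) : Int) 1).countP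
        (fun i => PySem.List.pyGetD Sl (PySem.List.pyGetD arr i 0) ' '
          != PySem.List.pyGetD Sl (PySem.List.pyGetD arr (i - 1) 0) ' ') : Nat) : Int)
        = pvC Sl arr t := by
  intro t
  induction t with
  | zero =>
    intro _
    rw [PySem.List.pyRange_one_eq_nil (by norm_num)]
    rfl
  | succ t ih =>
    intro ht
    have ht' : t < Sl.length := by omega
    rw [show ((t + 1 + 1 : Nat) : Int) = ((t + 1 : Nat) : Int) + 1 by push_cast; ring,
      PySem.List.pyRange_one_succ_right (by omega), List.countP_append]
    simp only [List.countP_cons, List.countP_nil, Nat.zero_add]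
    rw [pvChg_eq Sl arr t (hb (t + 1) ht) (hb t ht')]
    have hpc : pvC Sl arr (t + 1)
        = pvC Sl arr t + (if pvKey Sl arr (t + 1) ≠ pvKey Sl arr t then 1 else 0) := rfl
    rw [hpc, ← ih ht']
    rcases Decidable.eq_or_ne (pvKey Sl arr (t + 1)) (pvKey Sl arr t) with h | h
    · simp [h]
    · simp [h]

-- the boundary list is strictly increasing
lemma pvBoundaries_sorted (Sl : List Char) (arr : List Int) :
    ((PySem.List.pyRange 1 ((Sl.length : Nat) : Int) 1).filter
      (fun i => PySem.List.pyGetD Sl (PySem.List.pyGetD arr i 0) ' '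
        != PySem.List.pyGetD Sl (PySem.List.pyGetD arr (i - 1) 0) ' ')).Pairwise (· < ·) :=
  (PySem.List.pairwise_lt_pyRange_one 1 ((Sl.length : Nat) : Int)).sublist
    List.filter_sublist

-- the bisection over the boundary list yields pvC t, for any in-range rank t
lemma pvBisect_val (Sl : List Char) (arr : List Int)
    (hb : ∀ j, j < Sl.length → -(Sl.length : Int) ≤ arr.getD j 0 ∧ arr.getD j 0 < (Sl.length : Int))
    (t : Nat) (ht : t < Sl.length) :
    ((pvBisectLoop
      ((PySem.List.pyRange 1 ((Sl.length : Nat) : Int) 1).filter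
        (fun i => PySem.List.pyGetD Sl (PySem.List.pyGetD arr i 0) ' '
          != PySem.List.pyGetD Sl (PySem.List.pyGetD arr (i - 1) 0) ' '))
      ((t : Nat) : Int) 0
      ((PySem.List.pyRange 1 ((Sl.length : Nat) : Int) 1).filter
        (fun i => PySem.List.pyGetD Sl (PySem.List.pyGetD arr i 0) ' '
          != PySem.List.pyGetD Sl (PySem.List.pyGetD arr (i - 1) 0) ' ')).length : Nat) : Int)
      = pvC Sl arr t := by
  set chg := (fun i : Int => PySem.List.pyGetD Sl (PySem.List.pyGetD arr i 0) ' '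
      != PySem.List.pyGetD Sl (PySem.List.pyGetD arr (i - 1) 0) ' ') with hchg
  set bs := (PySem.List.pyRange 1 ((Sl.length : Nat) : Int) 1).filter chg with hbs
  rw [pvBisectLoop_count bs ((t : Nat) : Int) (pvBoundaries_sorted Sl arr) _ 0 bs.length rfl
    (by omega) le_rfl (by omega) (by omega)]
  -- countP (· ≤ t) over the filtered full range = countP chg over the prefix range 1..t
  rw [hbs, List.countP_filter]
  rw [show ((Sl.length : Nat) : Int) = ((t + 1 : Nat) : Int) + ((Sl.length - (t + 1) : Nat) : Int)
      by push_cast; omega]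
  rw [PySem.List.pyRange_one_append 1 ((t + 1 : Nat) : Int) _ (by omega) (by omega),
    List.countP_append]
  have h2 : (PySem.List.pyRange ((t + 1 : Nat) : Int)
      (((t + 1 : Nat) : Int) + ((Sl.length - (t + 1) : Nat) : Int)) 1).countP
      (fun a => decide (a ≤ ((t : Nat) : Int)) && chg a) = 0 := by
    rw [List.countP_eq_zero]
    intro a ha
    have := (PySem.List.mem_pyRange_one.mp ha).1
    simp only [Bool.and_eq_true, decide_eq_true_eq]
    rintro ⟨h1, -⟩
    omega
  have h1 : (PySem.List.pyRange 1 ((t + 1 : Nat) : Int) 1).countP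
      (fun a => decide (a ≤ ((t : Nat) : Int)) && chg a)
      = (PySem.List.pyRange 1 ((t + 1 : Nat) : Int) 1).countP chg := by
    apply List.countP_congr
    intro a ha
    have := PySem.List.mem_pyRange_one.mp ha
    have hle : decide (a ≤ ((t : Nat) : Int)) = true := by
      simp only [decide_eq_true_eq]; omega
    simp [hle]
  rw [h1, h2, Nat.add_zero]
  exact pvCntRange Sl arr hb t ht

-- B's scatter loop, processed up to rank t (inclusive), equals the first t+1 scatter writes
lemma pvBLoop (Sl : List Char) (arr : List Int)
    (hb : ∀ j, j < Sl.length → -(Sl.length : Int) ≤ arr.getD j 0 ∧ arr.getD j 0 < (Sl.length : Int)) :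
    ∀ t : Nat, t < Sl.length →
      (PySem.List.pyRange 1 ((t + 1 : Nat) : Int) 1).foldl
        (fun res i => PySem.List.pySetD res (PySem.List.pyGetD arr i 0)
          ((pvBisectLoop
            ((PySem.List.pyRange 1 ((Sl.length : Nat) : Int) 1).filter
              (fun i => PySem.List.pyGetD Sl (PySem.List.pyGetD arr i 0) ' '
                != PySem.List.pyGetD Sl (PySem.List.pyGetD arr (i - 1) 0) ' '))
            i 0
            ((PySem.List.pyRange 1 ((Sl.length : Nat) : Int) 1).filter
              (fun i => PySem.List.pyGetD Sl (PySem.List.pyGetD arr i 0) ' '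
                != PySem.List.pyGetD Sl (PySem.List.pyGetD arr (i - 1) 0) ' ')).length : Nat) : Int))
        (List.replicate Sl.length 0) = pvW Sl arr (t + 1) := by
  intro t
  induction t with
  | zero =>
    intro _
    rw [show (PySem.List.pyRange 1 ((0 + 1 : Nat) : Int) 1) = []
        from PySem.List.pyRange_one_eq_nil (by norm_num), List.foldl_nil, pvW_one]
  | succ t ih =>
    intro ht
    have ht' : t < Sl.length := by omega
    have hbt1 := hb (t + 1) ht
    rw [show ((t + 1 + 1 : Nat) : Int) = ((t + 1 : Nat) : Int) + 1 by push_cast; ring,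
      PySem.List.pyRange_one_succ_right (by omega), List.foldl_append, ih ht']
    simp only [List.foldl_cons, List.foldl_nil, PySem.List.pyGetD_natCast]
    rw [pvBisect_val Sl arr hb (t + 1) ht]
    have hlen : (pvW Sl arr (t + 1)).length = Sl.length := pvW_length Sl arr (t + 1)
    rw [pySetD_inrange (pvW Sl arr (t + 1)) _ _ (by rw [hlen]; exact hbt1.1)
      (by rw [hlen]; exact hbt1.2), hlen, ← pvW_succ Sl arr (t + 1)]

theorem class_character_arrangement_spec : Claim_equal_class_character_arrangement := by
  intro S arrangement _ hpre
  obtain ⟨hn, hlenA, hrng⟩ := hpre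
  unfold Spec_class_character_arrangement class_character_arrangement class_character_arrangement_alt
  simp only []
  set Sl := S.toList with hSl
  have hb : ∀ j, j < Sl.length → -(Sl.length : Int) ≤ arrangement.getD j 0 ∧ arrangement.getD j 0 < (Sl.length : Int) := by
    intro j hj
    have hj' : j < arrangement.length := by omega
    have hmem : arrangement[j] ∈ arrangement.take Sl.length := by
      have hjt : j < (arrangement.take Sl.length).length := by
        rw [List.length_take]; omega
      have h := List.getElem_mem hjt
      simpa using h
    have := hrng _ hmem
    simpa [List.getD_eq_getElem?_getD, List.getElem?_eq_getElem hj'] using this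
  have hnn : Sl.length - 1 + 1 = Sl.length := by omega
  have hb0 := hb 0 (by omega)
  have hcc0 : PySem.List.pySetD (List.replicate Sl.length (0 : Int))
      (PySem.List.pyGetD arrangement 0 0) 0 = pvW Sl arrangement 1 := by
    rw [PySem.List.pyGetD_zero,
      pySetD_inrange _ _ _ (by simpa using hb0.1) (by simpa using hb0.2)]
    simp only [List.length_replicate]
    simp [pvW, List.range_succ, pvC]
  have hA := pvALoop Sl arrangement hb (Sl.length - 1) (by omega)
  rw [hnn] at hA
  have hB := pvBLoop Sl arrangement hb (Sl.length - 1) (by omega)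
  rw [hnn] at hB
  rw [hcc0, hA, hB]
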